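-- pv_equiv track=rewrite | github.com/arob3303-unc/comp110-23f-workspace | lessons/diagram.py | odd_and_even
-- ===== SOURCE A (Python) =====
-- def odd_and_even(list1: list[int]) -> list[int]:
--     list2: list[int] = list1
--     new_list: list[int] = []
--     i: int = 0
--
--     for num in list2:
--         if num % 2 == 1:
--             if i % 2 == 0:
--                 new_list.append(num)
--                 i += 1
--             else:
--                 i += 1
--         else:
--             i += 1
--     return new_list
-- ===== SOURCE B (Python) =====
-- def odd_and_even(list1: list[int]) -> list[int]:
--     # Visit only the even positions directly (index loop with stride 2),
--     # instead of threading a parity counter through every element.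
--     result: list[int] = []
--     n: int = len(list1)
--     k: int = 0
--     while k < n:
--         if list1[k] % 2 == 1:
--             result.append(list1[k])
--         k += 2
--     return result
-- ===== Notes on version B (the rewrite author's own statement) =====
-- stated objective: alternative
-- what changed: A threads a parity counter through a loop over every element; B iterates an index with stride 2 so it visits only the even positions and just tests oddness there.
import Mathlib
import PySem

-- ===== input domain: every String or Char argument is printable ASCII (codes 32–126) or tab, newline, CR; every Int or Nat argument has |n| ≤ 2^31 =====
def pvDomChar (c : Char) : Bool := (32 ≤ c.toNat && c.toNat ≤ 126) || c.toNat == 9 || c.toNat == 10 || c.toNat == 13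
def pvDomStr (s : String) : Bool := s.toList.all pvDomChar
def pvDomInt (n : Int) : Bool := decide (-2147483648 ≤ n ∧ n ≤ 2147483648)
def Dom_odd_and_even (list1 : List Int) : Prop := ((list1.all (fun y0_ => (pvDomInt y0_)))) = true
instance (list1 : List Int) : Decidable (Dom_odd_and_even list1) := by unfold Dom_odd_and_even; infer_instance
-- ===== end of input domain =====

-- B visits only even indices (stride-2 index loop) instead of A's parity counter over all elements.

-- ===== PORT A =====
-- literal port of A: fold over the list with state (new_list, i)
def odd_and_even (list1 : List Int) : List Int :=
  (list1.foldl
    (fun (st : List Int × Int) num =>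
      if PySem.Int.mod num 2 = 1 then
        if PySem.Int.mod st.2 2 = 0 then (st.1 ++ [num], st.2 + 1)
        else (st.1, st.2 + 1)
      else (st.1, st.2 + 1))
    ([], 0)).1

-- ===== PORT B =====
-- the while-loop of Source B: k strides by 2 while k < n; list1[k] is in range there,
-- so getD k 0 is exact for Python's list1[k]
def oaeLoop (list1 : List Int) (n k : Nat) (result : List Int) : List Int :=
  if k < n then
    oaeLoop list1 n (k + 2)
      (if PySem.Int.mod (list1.getD k 0) 2 = 1 then result ++ [list1.getD k 0] else result)
  else result
termination_by n - k

def odd_and_even_alt (list1 : List Int) : List Int :=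
  oaeLoop list1 list1.length 0 []

-- ===== PRECONDITION & SPEC =====
def Spec_odd_and_even (list1 : List Int) (out : List Int) : Prop := out = odd_and_even_alt list1
instance (list1 : List Int) (out : List Int) : Decidable (Spec_odd_and_even list1 out) := by unfold Spec_odd_and_even; infer_instance

-- ===== CLAIM (what is proved, stated in full; the proofs are below) =====
def Claim_equal_odd_and_even : Prop := ∀ (list1 : List Int), Dom_odd_and_even list1 → Spec_odd_and_even list1 (odd_and_even list1)

-- ===== LEMMAS AND PROOFS =====

-- characterisation of A's fold: keep x iff x is odd and the running counter is even
def gA (l : List Int) (i : Int) : List Int :=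
  match l with
  | [] => []
  | x :: xs => (if PySem.Int.mod x 2 = 1 ∧ PySem.Int.mod i 2 = 0 then [x] else []) ++ gA xs (i + 1)

-- common spec: stride-2 filter of the odd values
def g2 : List Int → List Int
  | [] => []
  | x :: xs => (if PySem.Int.mod x 2 = 1 then [x] else []) ++ g2 (xs.drop 1)
termination_by l => l.length
decreasing_by simp

lemma foldA_eq_gA (l : List Int) (acc : List Int) (i : Int) :
    (l.foldl
      (fun (st : List Int × Int) num =>
        if PySem.Int.mod num 2 = 1 then
          if PySem.Int.mod st.2 2 = 0 then (st.1 ++ [num], st.2 + 1)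
          else (st.1, st.2 + 1)
        else (st.1, st.2 + 1))
      (acc, i)).1 = acc ++ gA l i := by
  induction l generalizing acc i with
  | nil => simp [gA]
  | cons x xs ih =>
    simp only [List.foldl_cons]
    by_cases h1 : PySem.Int.mod x 2 = 1
    · by_cases h2 : PySem.Int.mod i 2 = 0
      · rw [if_pos h1, if_pos h2, ih]
        simp only [gA]
        rw [if_pos ⟨h1, h2⟩]
        simp
      · rw [if_pos h1, if_neg h2, ih]
        simp only [gA]
        rw [if_neg (fun hc => h2 hc.2)]
        simp
    · rw [if_neg h1, ih]
      simp only [gA]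
      rw [if_neg (fun hc => h1 hc.1)]
      simp

lemma mod2_succ (i : Int) (h : PySem.Int.mod i 2 = 0) : PySem.Int.mod (i + 1) 2 ≠ 0 := by
  rw [PySem.Int.mod_eq_emod_of_pos (by norm_num)] at h ⊢
  omega

lemma mod2_succ_succ (i : Int) : PySem.Int.mod (i + 1 + 1) 2 = PySem.Int.mod i 2 := by
  rw [PySem.Int.mod_eq_emod_of_pos (by norm_num),
      PySem.Int.mod_eq_emod_of_pos (by norm_num)]
  omega

lemma gA_eq_g2 (l : List Int) : ∀ (i : Int), PySem.Int.mod i 2 = 0 → gA l i = g2 l := by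
  induction l using g2.induct with
  | case1 => intro i _; simp [gA, g2]
  | case2 x xs ih =>
    intro i hi
    simp only [gA, g2, hi, and_true]
    congr 1
    cases xs with
    | nil => simp [gA, g2]
    | cons y ys =>
      simp only [List.drop_succ_cons, List.drop_zero] at ih ⊢
      simp only [gA, mod2_succ i hi, and_false, if_false, List.nil_append]
      exact ih (i + 1 + 1) (by rw [mod2_succ_succ]; exact hi)

lemma oaeLoop_eq_g2 (l : List Int) (k : Nat) (result : List Int) :
    oaeLoop l l.length k result = result ++ g2 (l.drop k) := by
  rw [oaeLoop]
  by_cases h : k < l.length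
  · have hd : l.drop k = l[k] :: l.drop (k + 1) := List.drop_eq_getElem_cons h
    have hget : l.getD k 0 = l[k] := List.getD_eq_getElem l 0 h
    have hdd : l.drop (k + 2) = (l.drop (k + 1)).drop 1 := by
      rw [List.drop_drop]
    rw [if_pos h, oaeLoop_eq_g2 l (k + 2) _, hd]
    simp only [g2, hget, ← hdd]
    split_ifs with ho <;> simp
  · rw [if_neg h]
    have hnil : l.drop k = [] := List.drop_eq_nil_of_le (by omega)
    rw [hnil]
    simp [g2]
termination_by l.length - k
decreasing_by omega

-- ===== VERDICT (by name: the statement is the Claim_ definition above) =====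
theorem odd_and_even_spec : Claim_equal_odd_and_even := by
  intro list1 _
  unfold Spec_odd_and_even odd_and_even odd_and_even_alt
  rw [foldA_eq_gA, oaeLoop_eq_g2]
  simp [gA_eq_g2 list1 0 (by decide)]
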